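-- pv_equiv track=rewrite | github.com/evanbian/PixelAgentOS | backend/agents/context_pruning.py | _find_assistant_cutoff_index
-- ===== SOURCE A (Python) =====
-- from typing import Any, Dict, List, Optional
--
-- def _find_assistant_cutoff_index(
--     messages: List[Dict[str, Any]],
--     keep_last: int,
-- ) -> Optional[int]:
--     """Return the index of the Nth-from-last assistant message.
--
--     Messages *at or after* this index are in the protected tail and must
--     not be pruned.  Messages *before* this index are candidates for pruning
--     (subject to additional guards).
--
--     Args:
--         messages: Full message list.
--         keep_last: How many trailing assistant turns to protect.
--
--     Returns:
--         Index of the oldest assistant message that is still in the protected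
--         tail, or ``None`` if there are fewer than ``keep_last`` assistant
--         messages (meaning the entire history is protected).
--
--     Examples:
--         If keep_last=3 and there are assistant messages at indices
--         [2, 5, 9, 12], the function returns 9 -- the 3rd from the end.
--         Messages at indices 0..8 are pruning candidates.
--     """
--     if keep_last <= 0:
--         return len(messages)
--
--     remaining = keep_last
--     for i in range(len(messages) - 1, -1, -1):
--         if messages[i].get("role") == "assistant":
--             remaining -= 1
--             if remaining == 0:
--                 return i
--
--     # Not enough assistant messages -- entire history is protected
--     return None
-- ===== SOURCE B (Python) =====
-- from typing import Any, Dict, List, Optional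
--
-- def _find_assistant_cutoff_index(
--     messages: List[Dict[str, Any]],
--     keep_last: int,
-- ) -> Optional[int]:
--     if keep_last <= 0:
--         return len(messages)
--     idx = [i for i, m in enumerate(messages) if m.get("role") == "assistant"]
--     if len(idx) < keep_last:
--         return None
--     return idx[-keep_last]
-- ===== Notes on version B (the rewrite author's own statement) =====
-- stated objective: simpler
-- what changed: Replaces A's backward countdown loop with early exit by a single forward pass that collects all assistant indices and then selects the keep_last-th from the end by negative indexing.
import Mathlib
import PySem

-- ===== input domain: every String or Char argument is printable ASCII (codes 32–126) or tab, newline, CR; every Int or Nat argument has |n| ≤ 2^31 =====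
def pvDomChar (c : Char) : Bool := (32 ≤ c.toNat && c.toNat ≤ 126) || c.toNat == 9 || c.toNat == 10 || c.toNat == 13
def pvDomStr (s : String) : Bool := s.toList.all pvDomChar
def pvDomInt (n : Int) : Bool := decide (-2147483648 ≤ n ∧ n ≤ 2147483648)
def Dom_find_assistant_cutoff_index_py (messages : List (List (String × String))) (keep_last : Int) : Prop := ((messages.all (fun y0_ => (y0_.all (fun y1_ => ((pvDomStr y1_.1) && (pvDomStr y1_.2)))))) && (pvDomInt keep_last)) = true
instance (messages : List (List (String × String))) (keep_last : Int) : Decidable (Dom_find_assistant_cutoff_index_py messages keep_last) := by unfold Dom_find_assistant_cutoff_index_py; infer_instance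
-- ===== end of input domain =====

-- B replaces A's backward countdown loop with one forward pass that collects all
-- assistant indices, then selects the keep_last-th from the end (objective: simpler).

-- ===== PORT A =====
-- the `for i in range(len(messages)-1, -1, -1)` loop with early return, as a
-- recursion counting the index down (i = number of indices still to visit)
def pvLoopA (messages : List (List (String × String))) : Nat → Int → Option Int
  | 0, _ => none
  | i + 1, remaining =>
    if PySem.Dict.get? (PySem.Dict.mk (messages.getD i [])) "role" = some "assistant" then
      if remaining - 1 = 0 then some (i : Int)
      else pvLoopA messages i (remaining - 1)
    else pvLoopA messages i remaining

def find_assistant_cutoff_index_py (messages : List (List (String × String))) (keep_last : Int) : Option Int :=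
  if keep_last ≤ 0 then some (messages.length : Int)
  else pvLoopA messages messages.length keep_last

-- ===== PORT B =====
def find_assistant_cutoff_index_py_alt (messages : List (List (String × String))) (keep_last : Int) : Option Int :=
  if keep_last ≤ 0 then some (messages.length : Int)
  else
    let idx : List Int :=
      ((PySem.List.enumerate messages).filter
        (fun p => PySem.Dict.get? (PySem.Dict.mk p.2) "role" == some "assistant")).map (·.1)
    if (idx.length : Int) < keep_last then none
    else PySem.List.pyGet? idx (-keep_last)

-- ===== PRECONDITION & SPEC =====
def Spec_find_assistant_cutoff_index_py (messages : List (List (String × String))) (keep_last : Int) (out : Option Int) : Prop := out = find_assistant_cutoff_index_py_alt messages keep_last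
instance (messages : List (List (String × String))) (keep_last : Int) (out : Option Int) : Decidable (Spec_find_assistant_cutoff_index_py messages keep_last out) := by unfold Spec_find_assistant_cutoff_index_py; infer_instance

-- ===== CLAIM (what is proved, stated in full; the proofs are below) =====
def Claim_equal_find_assistant_cutoff_index_py : Prop := ∀ (messages : List (List (String × String))) (keep_last : Int), Dom_find_assistant_cutoff_index_py messages keep_last → Spec_find_assistant_cutoff_index_py messages keep_last (find_assistant_cutoff_index_py messages keep_last)

-- ===== LEMMAS AND PROOFS =====

-- assistant indices among the first n messages (proof-side reference list)
def pvAIdx (messages : List (List (String × String))) (n : Nat) : List Int :=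
  ((List.range n).filter
    (fun i => PySem.Dict.get? (PySem.Dict.mk (messages.getD i [])) "role" = some "assistant")).map (fun (i : Nat) => (i : Int))

lemma pvLoopA_eq (messages : List (List (String × String))) (n : Nat) :
    ∀ r : Int, 1 ≤ r →
      pvLoopA messages n r =
        (if ((pvAIdx messages n).length : Int) < r then none
         else (pvAIdx messages n)[(pvAIdx messages n).length - r.toNat]?) := by
  induction n with
  | zero =>
    intro r hr
    simp [pvLoopA, pvAIdx, show (0:Int) < r by omega]
  | succ n ih =>
    intro r hr
    rw [pvLoopA]
    by_cases hA : PySem.Dict.get? (PySem.Dict.mk (messages.getD n [])) "role" = some "assistant"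
    · have hJ : pvAIdx messages (n + 1) = pvAIdx messages n ++ [(n : Int)] := by
        unfold pvAIdx
        rw [List.range_succ, List.filter_append, List.map_append]
        congr 1
        rw [List.filter_cons_of_pos (by simpa using hA), List.filter_nil]
        rfl
      rw [if_pos hA]
      by_cases h1 : r - 1 = 0
      · have hr1 : r = 1 := by omega
        subst hr1
        rw [if_pos h1, hJ]
        rw [if_neg (by simp)]
        simp
      · rw [if_neg h1, ih (r - 1) (by omega), hJ]
        by_cases hlt : ((pvAIdx messages n).length : Int) < r - 1
        · rw [if_pos hlt, if_pos (by simp; omega)]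
        · rw [if_neg hlt, if_neg (by simp; omega)]
          rw [List.getElem?_append_left (by simp; omega)]
          congr 1
          simp
          omega
    · have hJ : pvAIdx messages (n + 1) = pvAIdx messages n := by
        unfold pvAIdx
        rw [List.range_succ, List.filter_append]
        rw [List.filter_cons_of_neg (by simpa using hA), List.filter_nil, List.append_nil]
      rw [if_neg hA, ih r hr, hJ]

lemma pvIdx_enum_aux (ms : List (List (String × String))) :
    ∀ s : Nat,
      ((PySem.List.enumerate ms (s : Int)).filter
        (fun p => PySem.Dict.get? (PySem.Dict.mk p.2) "role" == some "assistant")).map (·.1)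
      = ((List.range ms.length).filter
          (fun i => PySem.Dict.get? (PySem.Dict.mk (ms.getD i [])) "role" = some "assistant")).map
          (fun i => ((s + i : Nat) : Int)) := by
  induction ms with
  | nil => intro s; simp [PySem.List.enumerate_nil]
  | cons m ms ih =>
    intro s
    rw [PySem.List.enumerate_cons]
    have hcast : ((s : Int) + 1) = ((s + 1 : Nat) : Int) := by push_cast; ring
    by_cases hA : PySem.Dict.get? (PySem.Dict.mk m) "role" = some "assistant"
    · rw [List.filter_cons_of_pos (by simpa using hA), List.map_cons, hcast, ih (s + 1)]
      rw [show (m :: ms).length = ms.length + 1 from rfl, List.range_succ_eq_map]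
      rw [List.filter_cons_of_pos (by simpa using hA), List.map_cons]
      rw [List.filter_map, List.map_map]
      simp only [Function.comp_def, Nat.succ_eq_add_one, List.getD_eq_getElem?_getD,
        List.getElem?_cons_succ, Nat.add_zero]
      refine congrArg₂ List.cons (by simp) (List.map_congr_left (fun i _ => by omega))
    · rw [List.filter_cons_of_neg (by simpa using hA), hcast, ih (s + 1)]
      rw [show (m :: ms).length = ms.length + 1 from rfl, List.range_succ_eq_map]
      rw [List.filter_cons_of_neg (by simpa using hA)]
      rw [List.filter_map, List.map_map]
      simp only [Function.comp_def, Nat.succ_eq_add_one, List.getD_eq_getElem?_getD,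
        List.getElem?_cons_succ]
      exact List.map_congr_left (fun i _ => by omega)

lemma pvIdx_eq_enum (messages : List (List (String × String))) :
    ((PySem.List.enumerate messages).filter
        (fun p => PySem.Dict.get? (PySem.Dict.mk p.2) "role" == some "assistant")).map (·.1)
      = pvAIdx messages messages.length := by
  have h := pvIdx_enum_aux messages 0
  unfold pvAIdx
  rw [show ((0 : Nat) : Int) = (0 : Int) from rfl] at h
  rw [h]
  exact List.map_congr_left (fun i _ => by omega)

-- ===== VERDICT (by name: the statement is the Claim_ definition above) =====
theorem find_assistant_cutoff_index_py_spec : Claim_equal_find_assistant_cutoff_index_py := by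
  intro messages keep_last _
  unfold Spec_find_assistant_cutoff_index_py
  unfold find_assistant_cutoff_index_py find_assistant_cutoff_index_py_alt
  by_cases hk : keep_last ≤ 0
  · simp [hk]
  · rw [if_neg hk, if_neg hk]
    have hr : 1 ≤ keep_last := by omega
    rw [pvLoopA_eq messages messages.length keep_last hr]
    simp only [pvIdx_eq_enum]
    by_cases hlt : (((pvAIdx messages messages.length).length : Int)) < keep_last
    · rw [if_pos hlt, if_pos hlt]
    · rw [if_neg hlt, if_neg hlt]
      rw [show -keep_last = -((keep_last.toNat : Nat) : Int) by omega]
      rw [PySem.List.pyGet?_neg_natCast (xs := pvAIdx messages messages.length) (k := keep_last.toNat) (by omega) (by omega)]
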